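-- pv_equiv track=rewrite | github.com/sqwertyl/wordle-detect | wordle_extract.py | summarize_grid
-- ===== SOURCE A (Python) =====
-- def summarize_grid(grid):
--     num_guesses = 0
--     solved = False
--     for row in grid:
--         if row.count('E') != 5:
--             num_guesses += 1
--         if row.count('G') == 5:
--             solved = True
--             break
--     return num_guesses, solved
-- ===== SOURCE B (Python) =====
-- def summarize_grid(grid):
--     rows = list(grid)
--     idx = next((i for i, r in enumerate(rows) if r.count('G') == 5), None)
--     solved = idx is not None
--     considered = rows if idx is None else rows[:idx + 1]
--     num_guesses = sum(1 for r in considered if r.count('E') != 5)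
--     return num_guesses, solved
-- ===== Notes on version B (the rewrite author's own statement) =====
-- stated objective: alternative
-- what changed: Replaces the fused early-exit loop (counting and solved-detection interleaved with break) by a locate-then-count decomposition: first find the index of the first all-G row, then count non-all-E rows over the corresponding prefix.
import Mathlib
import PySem

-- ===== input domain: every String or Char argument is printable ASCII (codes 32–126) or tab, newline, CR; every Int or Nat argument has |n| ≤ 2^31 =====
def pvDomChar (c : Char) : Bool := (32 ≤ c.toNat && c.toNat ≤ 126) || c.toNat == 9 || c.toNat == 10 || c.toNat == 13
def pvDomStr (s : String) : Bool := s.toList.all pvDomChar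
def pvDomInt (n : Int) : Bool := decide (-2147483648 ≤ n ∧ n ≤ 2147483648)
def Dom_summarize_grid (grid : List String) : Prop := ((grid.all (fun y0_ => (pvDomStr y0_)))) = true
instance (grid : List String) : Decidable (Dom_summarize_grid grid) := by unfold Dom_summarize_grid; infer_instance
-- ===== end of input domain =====

-- B replaces A's fused early-exit counting loop by a locate-the-first-solved-row step followed by a count over the corresponding prefix (alternative decomposition, same cost).


-- ===== PORT A =====
-- A: fused loop with early exit on an all-G row
def summarize_grid_go : List String → Int → Int × Bool
  | [], n => (n, false)
  | r :: rs, n =>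
    let n' := if PySem.Str.count r "E" ≠ 5 then n + 1 else n
    if PySem.Str.count r "G" = 5 then (n', true) else summarize_grid_go rs n'

def summarize_grid (grid : List String) : Int × Bool :=
  summarize_grid_go grid 0

-- ===== PORT B =====
-- B: locate the first solved row, then count non-all-E rows over the prefix
def findSolvedIdx : List String → Option Nat
  | [] => none
  | r :: rs => if PySem.Str.count r "G" = 5 then some 0 else (findSolvedIdx rs).map (· + 1)

def summarize_grid_alt (grid : List String) : Int × Bool :=
  let idx := findSolvedIdx grid
  let considered := match idx with
    | none => grid
    | some i => grid.take (i + 1)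
  (((considered.filter (fun r => PySem.Str.count r "E" != 5)).length : Int), idx.isSome)

-- ===== PRECONDITION & SPEC =====
def Spec_summarize_grid (grid : List String) (out : Int × Bool) : Prop := out = summarize_grid_alt grid
instance (grid : List String) (out : Int × Bool) : Decidable (Spec_summarize_grid grid out) := by unfold Spec_summarize_grid; infer_instance

-- ===== CLAIM (what is proved, stated in full; the proofs are below) =====
def Claim_equal_summarize_grid : Prop := ∀ (grid : List String), Dom_summarize_grid grid → Spec_summarize_grid grid (summarize_grid grid)

-- ===== LEMMAS AND PROOFS =====

-- ===== VERDICT (by name: the statement is the Claim_ definition above) =====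
lemma summarize_grid_go_eq (rs : List String) (n : Int) :
    summarize_grid_go rs n = (n + (summarize_grid_alt rs).1, (summarize_grid_alt rs).2) := by
  induction rs generalizing n with
  | nil => simp [summarize_grid_go, summarize_grid_alt, findSolvedIdx]
  | cons r rs ih =>
    by_cases hg : PySem.Chars.count r.toList ['G'] = 5
    · by_cases he : PySem.Chars.count r.toList ['E'] = 5 <;>
        simp [summarize_grid_go, summarize_grid_alt, findSolvedIdx, PySem.Str.count, hg, he,
          List.filter]
    · cases hidx : findSolvedIdx rs with
      | none =>
        by_cases he : PySem.Chars.count r.toList ['E'] = 5 <;>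
          simp [summarize_grid_go, summarize_grid_alt, findSolvedIdx, PySem.Str.count, hg, he,
            hidx, ih, List.filter] <;> push_cast <;> ring
      | some i =>
        by_cases he : PySem.Chars.count r.toList ['E'] = 5 <;>
          simp [summarize_grid_go, summarize_grid_alt, findSolvedIdx, PySem.Str.count, hg, he,
            hidx, ih, List.filter, List.take] <;> push_cast <;> ring

theorem summarize_grid_spec : Claim_equal_summarize_grid := by
  intro grid _
  unfold Spec_summarize_grid summarize_grid
  rw [summarize_grid_go_eq]
  simp
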